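-- pv_equiv track=rewrite | github.com/miliar/Code_Jam_Webscraper | solutions_python/Problem_155/954.py | solve
-- ===== SOURCE A (Python) =====
-- def solve(ss):
--     needed = 0
--     standing = 0
--     for i in range(len(ss)):
--         if standing < i:
--             needed = needed + (i - standing)
--             standing = i
--         standing = standing + ss[i]
--     return needed
-- ===== SOURCE B (Python) =====
-- def solve(ss):
--     # max-of-deficits over plain prefix sums (no stateful "standing" bumping)
--     total = 0
--     deficits = [0]
--     for i, x in enumerate(ss):
--         deficits.append(i - total)
--         total += x
--     return max(deficits)
-- ===== Notes on version B (the rewrite author's own statement) =====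
-- stated objective: alternative
-- what changed: B replaces A's mutable 'standing' state (bumped up to i, with incremental 'needed' accumulation) by an unconditional prefix sum and a final max over the deficits i - prefix(i).
import Mathlib
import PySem

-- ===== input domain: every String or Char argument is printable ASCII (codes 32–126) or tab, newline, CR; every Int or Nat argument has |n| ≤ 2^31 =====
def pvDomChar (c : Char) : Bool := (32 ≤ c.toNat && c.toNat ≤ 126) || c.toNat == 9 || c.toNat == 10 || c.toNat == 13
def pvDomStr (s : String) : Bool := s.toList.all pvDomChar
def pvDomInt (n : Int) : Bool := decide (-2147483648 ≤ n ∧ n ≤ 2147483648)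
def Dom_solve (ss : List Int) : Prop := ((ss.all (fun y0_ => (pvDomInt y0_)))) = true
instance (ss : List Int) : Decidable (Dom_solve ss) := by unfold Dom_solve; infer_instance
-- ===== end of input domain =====

-- B replaces A's mutable "standing" state by a plain prefix sum and a final max over the deficits (alternative decomposition, same O(n) cost).


-- ===== PORT A =====
-- for i in range(len(ss)) with ss[i]: folded over enumerate (same index/element pairs);
-- state = (needed, standing), branch in source order.
def solve (ss : List Int) : Int :=
  (PySem.List.enumerate ss 0).foldl
    (fun (p : Int × Int) (ix : Int × Int) =>
      if p.2 < ix.1 then (p.1 + (ix.1 - p.2), ix.1 + ix.2)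
      else (p.1, p.2 + ix.2))
    (0, 0) |>.1

-- ===== PORT B =====
-- state = (total, deficits); deficits starts [0]; append i - total, then total += x; return max(deficits).
def solve_alt (ss : List Int) : Int :=
  let st := (PySem.List.enumerate ss 0).foldl
    (fun (p : Int × List Int) (ix : Int × Int) =>
      (p.1 + ix.2, p.2 ++ [ix.1 - p.1]))
    (0, [0])
  match PySem.List.max? st.2 (fun y => y) with
  | some m => m
  | none => 0

-- ===== PRECONDITION & SPEC =====
def Spec_solve (ss : List Int) (out : Int) : Prop := out = solve_alt ss
instance (ss : List Int) (out : Int) : Decidable (Spec_solve ss out) := by unfold Spec_solve; infer_instance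

-- ===== CLAIM (what is proved, stated in full; the proofs are below) =====
def Claim_equal_solve : Prop := ∀ (ss : List Int), Dom_solve ss → Spec_solve ss (solve ss)

-- ===== LEMMAS AND PROOFS =====
-- Invariant: A's standing = B's total + A's needed, and A's needed is the running max
-- (rest.foldl max d) of the deficits recorded so far (d = head of the deficit list).
theorem solve_loop (l : List Int) (s : Int) (n t d : Int) (rest : List Int)
    (hn : n = rest.foldl max d) :
    ∃ rest' : List Int,
      ((PySem.List.enumerate l s).foldl
        (fun (p : Int × List Int) (ix : Int × Int) =>
          (p.1 + ix.2, p.2 ++ [ix.1 - p.1])) (t, d :: rest)).2 = d :: rest' ∧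
      ((PySem.List.enumerate l s).foldl
        (fun (p : Int × Int) (ix : Int × Int) =>
          if p.2 < ix.1 then (p.1 + (ix.1 - p.2), ix.1 + ix.2)
          else (p.1, p.2 + ix.2)) (n, t + n)).1 = rest'.foldl max d := by
  induction l generalizing s n t rest with
  | nil => exact ⟨rest, by simp [PySem.List.enumerate_nil], by simp [PySem.List.enumerate_nil, hn]⟩
  | cons x xs ih =>
    rw [PySem.List.enumerate_cons]
    simp only [List.foldl_cons]
    by_cases h : t + n < s
    · have := ih (s + 1) (s - t) (t + x) (rest ++ [s - t])
        (by simp [List.foldl_append]; omega)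
      simp only [if_pos h] at *
      have harr : s + x = (t + x) + (s - t) := by ring
      obtain ⟨rest', h1, h2⟩ := this
      refine ⟨rest', by simpa using h1, ?_⟩
      have : n + (s - (t + n)) = s - t := by ring
      rw [this, harr] at *
      exact h2
    · have hmax : max n (s - t) = n := by omega
      have := ih (s + 1) n (t + x) (rest ++ [s - t])
        (by simp [List.foldl_append, hn]; omega)
      simp only [if_neg h] at *
      obtain ⟨rest', h1, h2⟩ := this
      refine ⟨rest', by simpa using h1, ?_⟩
      have : t + n + x = (t + x) + n := by ring
      rw [this]
      exact h2

-- ===== VERDICT (by name: the statement is the Claim_ definition above) =====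
theorem solve_spec : Claim_equal_solve := by
  intro ss _
  unfold Spec_solve solve solve_alt
  obtain ⟨rest', h1, h2⟩ := solve_loop ss 0 0 0 0 [] (by simp)
  simp only [Int.add_zero] at h2
  simp only [h1, h2, PySem.List.max?_id_cons]
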